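-- pv_equiv track=rewrite | github.com/fabriziosalmi/notransformers | evolutionary_discovery/grammar.py | expand_grammar
-- ===== SOURCE A (Python) =====
-- def is_terminal(symbol):
--     """Verifica se un simbolo è terminale (non contiene < >)"""
--     return not (symbol.startswith('<') and symbol.endswith('>'))
--
-- def expand_grammar(genes, grammar, max_expansions=50):
--     """
--     Espande una grammatica usando una sequenza di geni
--
--     Args:
--         genes: Lista di interi che guidano le scelte grammaticali
--         grammar: Dizionario della grammatica con regole di produzione
--         max_expansions: Numero massimo di espansioni per evitare loop infiniti
--
--     Returns:
--         Lista di terminali che rappresenta l'architettura finale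
--     """
--     # Inizia con il simbolo di partenza
--     sequence = ["<start>"]
--     gene_index = 0
--     expansions = 0
--
--     while expansions < max_expansions:
--         # Trova il primo non-terminale
--         non_terminal_found = False
--         for i, symbol in enumerate(sequence):
--             if not is_terminal(symbol):
--                 non_terminal_found = True
--
--                 # Prendi il prossimo gene (con wrapping se necessario)
--                 if gene_index < len(genes):
--                     gene = genes[gene_index]
--                     gene_index += 1
--                 else:
--                     # Se finiamo i geni, usa un valore di default
--                     gene = 0
--
--                 # Scegli una regola di produzione
--                 if symbol in grammar:
--                     rules = grammar[symbol]
--                     rule_index = gene % len(rules)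
--                     chosen_rule = rules[rule_index]
--
--                     # Sostituisci il non-terminale con la regola scelta
--                     sequence = sequence[:i] + chosen_rule + sequence[i+1:]
--                 else:
--                     # Se il simbolo non è nella grammatica, rimuovilo
--                     sequence = sequence[:i] + sequence[i+1:]
--
--                 expansions += 1
--                 break
--
--         if not non_terminal_found:
--             # Tutti i simboli sono terminali
--             break
--
--     # Filtra solo i terminali finali
--     final_sequence = [symbol for symbol in sequence if is_terminal(symbol)]
--     return final_sequence
-- ===== SOURCE B (Python) =====
-- def is_terminal(symbol):
--     """Verifica se un simbolo è terminale (non contiene < >)"""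
--     return not (symbol.startswith('<') and symbol.endswith('>'))
--
-- def expand_grammar(genes, grammar, max_expansions=50):
--     """Single left-to-right pass over an explicit symbol stack (leftmost symbol on
--     top) instead of repeated scan-from-start + slice rebuilds of the sequence."""
--     output = []
--     stack = ["<start>"]
--     gene_index = 0
--     budget = max_expansions
--     while stack:
--         symbol = stack.pop()
--         if is_terminal(symbol):
--             output.append(symbol)
--         elif budget > 0:
--             gene = 0
--             if gene_index < len(genes):
--                 gene = genes[gene_index]
--                 gene_index += 1
--             budget -= 1
--             if symbol in grammar:
--                 rules = grammar[symbol]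
--                 stack.extend(reversed(rules[gene % len(rules)]))
--         # non-terminal after the expansion budget is spent: drop it
--     return output
-- ===== Notes on version B (the rewrite author's own statement) =====
-- stated objective: alternative
-- what changed: Replaces A's repeated scan-for-first-non-terminal plus slice-and-concatenate rebuild of the whole sequence with a single pass over an explicit stack (leftmost symbol on top) that emits terminals directly, discards non-terminals once the expansion budget is spent, and pushes chosen rules reversed.
-- outside the precondition, e.g. on expand_grammar([1], {'<start>': [['<x>'], ['a']], '<x>': []}, 5): A returns ['a'], B returns ['a']
import Mathlib
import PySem

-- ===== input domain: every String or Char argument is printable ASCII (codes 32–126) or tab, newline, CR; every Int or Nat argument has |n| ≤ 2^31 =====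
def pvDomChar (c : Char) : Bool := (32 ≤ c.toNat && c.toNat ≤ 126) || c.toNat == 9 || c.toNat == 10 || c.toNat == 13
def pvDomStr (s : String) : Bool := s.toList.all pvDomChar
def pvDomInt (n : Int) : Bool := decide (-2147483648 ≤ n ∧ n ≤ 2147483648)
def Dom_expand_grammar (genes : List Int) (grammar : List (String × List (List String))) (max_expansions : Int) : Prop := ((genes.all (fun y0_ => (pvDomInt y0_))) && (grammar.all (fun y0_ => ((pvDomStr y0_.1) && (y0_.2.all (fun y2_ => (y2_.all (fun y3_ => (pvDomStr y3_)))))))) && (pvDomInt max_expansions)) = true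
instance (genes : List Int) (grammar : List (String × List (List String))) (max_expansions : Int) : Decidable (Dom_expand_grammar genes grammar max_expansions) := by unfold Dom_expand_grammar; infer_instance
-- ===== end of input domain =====

-- B replaces A's repeated scan-from-start + slice-rebuild of the sequence by one pass
-- over an explicit stack (leftmost symbol on top), appending terminals to the output.


-- ===== PORT A =====
-- module-level helper is_terminal (shared by both sources)
def isTerminalP (symbol : String) : Bool :=
  !(PySem.Str.startswith symbol "<" && PySem.Str.endswith symbol ">")

-- gene fetch of the loop body (same lines in both sources): genes[gene_index] with
-- default 0 when the genes are exhausted, and the updated index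
def geneAt (genes : List Int) (gi : Nat) : Int :=
  if gi < genes.length then (PySem.List.pyGet? genes (gi : Int)).getD 0 else 0
def geneNext (genes : List Int) (gi : Nat) : Nat :=
  if gi < genes.length then gi + 1 else gi

-- the for-loop of A: first (index, symbol) with a non-terminal symbol
def findNT : List String → Option (Nat × String)
  | [] => none
  | s :: rest =>
      if isTerminalP s then (findNT rest).map (fun p => (p.1 + 1, p.2)) else some (0, s)

-- the while-loop of A; fuel = max_expansions - expansions (A increments expansions each pass).
-- 'gene % len(rules)' is PySem.Int.mod?: none is exactly Python's ZeroDivisionError on an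
-- empty rule list (excluded by Pre_); the port arbitrarily stops and returns the sequence there.
def aLoop (genes : List Int) (grammar : List (String × List (List String))) :
    Nat → List String → Nat → List String
  | 0, sequence, _ => sequence
  | fuel + 1, sequence, gi =>
      match findNT sequence with
      | none => sequence
      | some (i, symbol) =>
          let gene := geneAt genes gi
          let gi' := geneNext genes gi
          match (PySem.Dict.mk grammar).get? symbol with
          | some rules =>
              match PySem.Int.mod? gene (rules.length : Int) with
              | none => sequence  -- Python raises ZeroDivisionError here
              | some ri =>
                  let chosen := (PySem.List.pyGet? rules ri).getD []
                  aLoop genes grammar fuel (sequence.take i ++ chosen ++ sequence.drop (i + 1)) gi'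
          | none =>
              aLoop genes grammar fuel (sequence.take i ++ sequence.drop (i + 1)) gi'

def expand_grammar (genes : List Int) (grammar : List (String × List (List String))) (max_expansions : Int) : List String :=
  (aLoop genes grammar max_expansions.toNat ["<start>"] 0).filter isTerminalP

-- ===== PORT B =====
-- the while-loop of Source B: pop from the stack (top = head), append terminals to the output;
-- on 'gene % len(rules)' with empty rules Python raises (excluded by Pre_); this port
-- arbitrarily stops and returns the output accumulated so far there.
def bLoop (genes : List Int) (grammar : List (String × List (List String))) :
    List String → List String → Nat → Int → List String
  | [], output, _, _ => output
  | symbol :: stack, output, gi, budget =>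
      if isTerminalP symbol then
        bLoop genes grammar stack (output ++ [symbol]) gi budget
      else if 0 < budget then
        let gene := geneAt genes gi
        let gi' := geneNext genes gi
        match (PySem.Dict.mk grammar).get? symbol with
        | some rules =>
            match PySem.Int.mod? gene (rules.length : Int) with
            | none => output  -- Python raises ZeroDivisionError here
            | some ri =>
                let chosen := (PySem.List.pyGet? rules ri).getD []
                bLoop genes grammar (chosen ++ stack) output gi' (budget - 1)
        | none => bLoop genes grammar stack output gi' (budget - 1)
      else
        bLoop genes grammar stack output gi budget
  termination_by stack _ _ budget => (budget.toNat, stack.length)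
  decreasing_by
    all_goals simp_wf
    all_goals first
      | exact Prod.Lex.right _ (by simp)
      | exact Prod.Lex.left _ _ (by omega)

def expand_grammar_alt (genes : List Int) (grammar : List (String × List (List String))) (max_expansions : Int) : List String :=
  bLoop genes grammar ["<start>"] [] 0 max_expansions

-- ===== PRECONDITION & SPEC =====
-- Pre_ excludes grammars in which some symbol maps to an EMPTY rule list while that symbol could
-- ever enter the sequence (it is "<start>" or occurs in some rule body): expanding such a symbol
-- makes Python's 'gene % len(rules)' raise ZeroDivisionError (in A and in B alike); a mentioned
-- empty-ruled symbol the derivation happens never to reach is excluded too (cited in claim.json).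
def Pre_expand_grammar (genes : List Int) (grammar : List (String × List (List String))) (max_expansions : Int) : Prop :=
  ∀ p ∈ grammar, p.2 ≠ [] ∨ (p.1 ≠ "<start>" ∧ ∀ q ∈ grammar, ∀ rule ∈ q.2, p.1 ∉ rule)
instance (genes : List Int) (grammar : List (String × List (List String))) (max_expansions : Int) : Decidable (Pre_expand_grammar genes grammar max_expansions) := by unfold Pre_expand_grammar; infer_instance

def pvWitness_expand_grammar : List Int × (List (String × List (List String))) × Int :=
  ([2, 0, 1], [("<start>", [["a", "<x>"], ["b"]]), ("<x>", [["c"], ["d", "<x>"]])], 10)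

def Spec_expand_grammar (genes : List Int) (grammar : List (String × List (List String))) (max_expansions : Int) (out : List String) : Prop := out = expand_grammar_alt genes grammar max_expansions
instance (genes : List Int) (grammar : List (String × List (List String))) (max_expansions : Int) (out : List String) : Decidable (Spec_expand_grammar genes grammar max_expansions out) := by unfold Spec_expand_grammar; infer_instance

-- ===== CLAIM (what is proved, stated in full; the proofs are below) =====
def Claim_equal_expand_grammar : Prop := ∀ (genes : List Int) (grammar : List (String × List (List String))) (max_expansions : Int), Dom_expand_grammar genes grammar max_expansions → Pre_expand_grammar genes grammar max_expansions → Spec_expand_grammar genes grammar max_expansions (expand_grammar genes grammar max_expansions)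

-- ===== LEMMAS AND PROOFS =====

-- a symbol that can ever appear in the sequence: the start symbol or one mentioned in a rule body
def Reach (grammar : List (String × List (List String))) (s : String) : Prop :=
  s = "<start>" ∨ ∃ q ∈ grammar, ∃ rule ∈ q.2, s ∈ rule

theorem get?_mk_mem {v : List (List String)} (grammar : List (String × List (List String))) (k : String)
    (h : (PySem.Dict.mk grammar).get? k = some v) : (k, v) ∈ grammar := by
  induction grammar with
  | nil => simp [PySem.Dict.get?] at h
  | cons p rest ih =>
      rw [PySem.Dict.get?_mk_cons] at h
      by_cases hk : p.1 == k
      · rw [if_pos hk] at h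
        obtain ⟨a, b⟩ := p
        have ha : a = k := by simpa using hk
        have hb : b = v := by simpa using h
        subst ha; subst hb
        exact List.mem_cons.mpr (Or.inl rfl)
      · rw [if_neg hk] at h
        exact List.mem_cons_of_mem _ (ih h)

theorem findNT_of_all_terminal (out : List String) (h : ∀ s ∈ out, isTerminalP s = true) :
    findNT out = none := by
  induction out with
  | nil => rfl
  | cons s rest ih =>
      simp only [findNT, h s (by simp)]
      rw [ih (fun x hx => h x (by simp [hx]))]
      rfl

theorem findNT_append_nonterm (out : List String) (s : String) (rest : List String)
    (h : ∀ x ∈ out, isTerminalP x = true) (hs : isTerminalP s = false) :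
    findNT (out ++ s :: rest) = some (out.length, s) := by
  induction out with
  | nil => simp [findNT, hs]
  | cons y ys ih =>
      simp only [List.cons_append, findNT, h y (by simp)]
      rw [ih (fun x hx => h x (by simp [hx]))]
      simp

theorem bLoop_budget_exhausted (genes : List Int) (grammar : List (String × List (List String)))
    (stack : List String) (budget : Int) (hb : budget.toNat = 0) :
    ∀ out gi, bLoop genes grammar stack out gi budget = out ++ stack.filter isTerminalP := by
  induction stack with
  | nil => intro out gi; simp [bLoop]
  | cons s rest ih =>
      intro out gi
      by_cases hs : isTerminalP s = true
      · rw [bLoop, if_pos hs, ih, List.filter_cons_of_pos hs]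
        simp
      · have hb' : ¬ (0 < budget) := by omega
        rw [bLoop, if_neg (by simp [hs]), if_neg hb', ih,
          List.filter_cons_of_neg (by simp [hs])]

theorem aLoop_eq_bLoop (genes : List Int) (grammar : List (String × List (List String)))
    (hpre : ∀ p ∈ grammar, p.2 ≠ [] ∨ (p.1 ≠ "<start>" ∧ ∀ q ∈ grammar, ∀ rule ∈ q.2, p.1 ∉ rule)) :
    ∀ fuel : Nat, ∀ stack out : List String, ∀ gi : Nat, ∀ budget : Int,
      budget.toNat = fuel → (∀ s ∈ out, isTerminalP s = true) →
      (∀ s ∈ stack, Reach grammar s) →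
      (aLoop genes grammar fuel (out ++ stack) gi).filter isTerminalP =
        bLoop genes grammar stack out gi budget := by
  intro fuel
  induction fuel with
  | zero =>
      intro stack out gi budget hb hout _
      rw [aLoop, bLoop_budget_exhausted genes grammar stack budget hb, List.filter_append,
        List.filter_eq_self.mpr hout]
  | succ f ihf =>
      intro stack out gi budget hb hout hstack
      induction stack generalizing out gi budget with
      | nil =>
          rw [List.append_nil, aLoop, findNT_of_all_terminal out hout]
          simp [bLoop, List.filter_eq_self.mpr hout]
      | cons s rest ihs =>
          have hrest : ∀ x ∈ rest, Reach grammar x := fun x hx => hstack x (by simp [hx])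
          by_cases hs : isTerminalP s = true
          · have hout' : ∀ x ∈ out ++ [s], isTerminalP x = true := by
              intro x hx
              rcases List.mem_append.mp hx with h | h
              · exact hout x h
              · rw [List.mem_singleton.mp h]; exact hs
            rw [show out ++ s :: rest = (out ++ [s]) ++ rest from by simp,
              ihs (out ++ [s]) gi budget hb hout' hrest, bLoop, if_pos hs]
          · have hbpos : (0 : Int) < budget := by omega
            have hdrop : (out ++ s :: rest).drop (out.length + 1) = rest := by
              rw [show out ++ s :: rest = (out ++ [s]) ++ rest from by simp,
                show out.length + 1 = (out ++ [s]).length from by simp]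
              exact List.drop_left
            have hbn : (budget - 1).toNat = f := by omega
            rw [aLoop, findNT_append_nonterm out s rest hout (by simpa using hs)]
            rw [bLoop, if_neg (by simp [hs]), if_pos hbpos]
            cases hlook : (PySem.Dict.mk grammar).get? s with
            | some rules =>
                have hmem : (s, rules) ∈ grammar := get?_mk_mem grammar s hlook
                have hne : rules ≠ [] := by
                  rcases hpre (s, rules) hmem with h | ⟨hns, hno⟩
                  · exact h
                  · rcases hstack s (by simp) with h0 | ⟨q, hq, rule, hr, hsr⟩
                    · exact absurd h0 hns
                    · exact absurd hsr (hno q hq rule hr)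
                simp only [hlook]
                rw [show PySem.Int.mod? (geneAt genes gi) (rules.length : Int)
                    = some (PySem.Int.mod (geneAt genes gi) (rules.length : Int)) from by
                  simp [PySem.Int.mod?, PySem.Int.mod, hne]]
                simp only [List.take_left, hdrop]
                have hchosen : ∀ x ∈ (PySem.List.pyGet? rules
                    (PySem.Int.mod (geneAt genes gi) (rules.length : Int))).getD [], Reach grammar x := by
                  intro x hx
                  cases hget : PySem.List.pyGet? rules
                      (PySem.Int.mod (geneAt genes gi) (rules.length : Int)) with
                  | none => rw [hget] at hx; simp at hx
                  | some r =>
                      rw [hget] at hx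
                      exact Or.inr ⟨(s, rules), hmem, r,
                        PySem.List.mem_of_pyGet?_eq_some rules hget, by simpa using hx⟩
                rw [show out ++ ((PySem.List.pyGet? rules (PySem.Int.mod (geneAt genes gi) (rules.length : Int))).getD []) ++ rest
                    = out ++ (((PySem.List.pyGet? rules (PySem.Int.mod (geneAt genes gi) (rules.length : Int))).getD []) ++ rest) from by simp]
                refine ihf _ out (geneNext genes gi) (budget - 1) hbn hout ?_
                intro x hx
                rcases List.mem_append.mp hx with h | h
                · exact hchosen x h
                · exact hrest x h
            | none =>
                simp only [hlook, List.take_left, hdrop]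
                exact ihf rest out (geneNext genes gi) (budget - 1) hbn hout hrest

-- ===== VERDICT (by name: the statement is the Claim_ definition above) =====
theorem expand_grammar_spec : Claim_equal_expand_grammar := by
  intro genes grammar mx _ hpre
  unfold Spec_expand_grammar expand_grammar expand_grammar_alt
  exact aLoop_eq_bLoop genes grammar hpre mx.toNat ["<start>"] [] 0 mx rfl (by simp)
    (by intro s hs; rw [List.mem_singleton.mp hs]; exact Or.inl rfl)
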